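-- pv_equiv track=rewrite | github.com/anandprakash-web/kiwimath | backend/app/services/safe_eval.py | _count_factor_pairs
-- ===== SOURCE A (Python) =====
-- def _count_factor_pairs(n):
--     """Count factor pairs of n (e.g. 12 has pairs (1,12),(2,6),(3,4) = 3)."""
--     n = int(abs(n))
--     if n == 0:
--         return 0
--     count = 0
--     i = 1
--     while i * i <= n:
--         if n % i == 0:
--             count += 1
--         i += 1
--     return count
-- ===== SOURCE B (Python) =====
-- def _count_factor_pairs(n):
--     """Count factor pairs of n via prime factorization:
--     tau(n) = prod(e_i + 1); number of pairs is (tau + 1) // 2."""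
--     n = int(abs(n))
--     if n == 0:
--         return 0
--     tau = 1
--     p = 2
--     while p * p <= n:
--         if n % p == 0:
--             e = 0
--             while n % p == 0:
--                 n //= p
--                 e += 1
--             tau *= e + 1
--         p += 1
--     if n > 1:
--         tau *= 2
--     return (tau + 1) // 2
-- ===== Notes on version B (the rewrite author's own statement) =====
-- stated objective: alternative
-- what changed: Instead of scanning every i up to sqrt(n) and counting divisors directly, B factorizes n by trial division, computes the divisor count tau as the product of (exponent+1), and returns the pair count via the closed form (tau+1)//2.
import Mathlib
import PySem

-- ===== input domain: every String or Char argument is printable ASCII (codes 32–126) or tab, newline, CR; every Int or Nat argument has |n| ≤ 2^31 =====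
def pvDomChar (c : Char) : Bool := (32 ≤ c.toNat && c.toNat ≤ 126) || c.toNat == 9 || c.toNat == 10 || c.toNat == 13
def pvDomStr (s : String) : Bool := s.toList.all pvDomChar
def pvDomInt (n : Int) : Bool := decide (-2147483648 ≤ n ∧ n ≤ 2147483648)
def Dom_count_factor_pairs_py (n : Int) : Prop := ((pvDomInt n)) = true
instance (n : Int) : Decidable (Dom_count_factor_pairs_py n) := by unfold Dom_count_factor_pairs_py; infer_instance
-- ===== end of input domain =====

-- B replaces A's divisor scan up to sqrt(n) by trial-division prime factorization:
-- tau(n) = prod (e_i + 1), and the pair count is the closed form (tau + 1) / 2 (objective: alternative).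

-- ===== PORT A =====
-- while i * i <= n: if n % i == 0: count += 1; i += 1   (n is a nonnegative int after n = int(abs(n)))
def countA_loop (N i count : Nat) : Nat :=
  if i * i ≤ N then
    countA_loop N (i + 1) (if N % i = 0 then count + 1 else count)
  else count
termination_by N + 1 - i
decreasing_by
  rename_i h
  rcases Nat.eq_zero_or_pos i with rfl | hi
  · omega
  · have : i ≤ i * i := Nat.le_mul_of_pos_left i hi
    omega

def count_factor_pairs_py (n : Int) : Int :=
  let N : Nat := n.natAbs          -- n = int(abs(n))
  if N = 0 then 0 else (countA_loop N 1 0 : Int)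

-- ===== PORT B =====
-- inner loop: e = 0; while n % p == 0: n //= p; e += 1   (the 2 ≤ p / 0 < m guards only make the recursion total;
-- they hold at every call reached from count_factor_pairs_py_alt)
def divOut (m p e : Nat) : Nat × Nat :=
  if h : 2 ≤ p ∧ 0 < m ∧ m % p = 0 then divOut (m / p) p (e + 1) else (m, e)
termination_by m
decreasing_by exact Nat.div_lt_self h.2.1 (by omega)

theorem divOut_fst_le (m p e : Nat) : (divOut m p e).1 ≤ m := by
  induction m using Nat.strong_induction_on generalizing e with
  | _ m ih =>
    rw [divOut]
    split
    · next h =>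
      exact le_trans (ih (m / p) (Nat.div_lt_self h.2.1 (by omega)) _) (Nat.div_le_self _ _)
    · exact le_refl m

theorem divOut_fst_lt (m p e : Nat) (hp : 2 ≤ p) (hm : 0 < m) (hd : m % p = 0) :
    (divOut m p e).1 < m := by
  rw [divOut]
  rw [dif_pos ⟨hp, hm, hd⟩]
  exact lt_of_le_of_lt (divOut_fst_le _ _ _) (Nat.div_lt_self hm (by omega))

-- outer loop: while p * p <= n: if n % p == 0: extract p, tau *= e + 1; p += 1
def tauLoop (m p tau : Nat) : Nat × Nat :=
  if h : p * p ≤ m ∧ 2 ≤ p then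
    if hd : m % p = 0 then
      let r := divOut m p 0
      tauLoop r.1 (p + 1) (tau * (r.2 + 1))
    else tauLoop m (p + 1) tau
  else (m, tau)
termination_by (m, m + 1 - p)
decreasing_by
  · exact Prod.Lex.left _ _ (divOut_fst_lt m p 0 h.2
      (by have := Nat.mul_le_mul h.2 h.2; omega) hd)
  · apply Prod.Lex.right
    have : p ≤ p * p := Nat.le_mul_of_pos_left p (by omega)
    omega

def count_factor_pairs_py_alt (n : Int) : Int :=
  let N : Nat := n.natAbs          -- n = int(abs(n))
  if N = 0 then 0 else
    let r := tauLoop N 2 1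
    let tau := if 1 < r.1 then r.2 * 2 else r.2
    (((tau + 1) / 2 : Nat) : Int)

-- ===== PRECONDITION & SPEC =====
def Spec_count_factor_pairs_py (n : Int) (out : Int) : Prop := out = count_factor_pairs_py_alt n
instance (n : Int) (out : Int) : Decidable (Spec_count_factor_pairs_py n out) := by unfold Spec_count_factor_pairs_py; infer_instance

-- ===== CLAIM (what is proved, stated in full; the proofs are below) =====
def Claim_equal_count_factor_pairs_py : Prop := ∀ (n : Int), Dom_count_factor_pairs_py n → Spec_count_factor_pairs_py n (count_factor_pairs_py n)

-- ===== LEMMAS AND PROOFS =====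

-- A's loop counts the divisors d of N with i ≤ d and d * d ≤ N.
theorem countA_inv (N : Nat) (hN : 0 < N) :
    ∀ i c, 0 < i →
      countA_loop N i c = c + ((N.divisors).filter (fun d => i ≤ d ∧ d * d ≤ N)).card := by
  suffices h : ∀ k i c, N + 1 - i = k → 0 < i →
      countA_loop N i c = c + ((N.divisors).filter (fun d => i ≤ d ∧ d * d ≤ N)).card by
    intro i c hi; exact h _ i c rfl hi
  intro k
  induction k using Nat.strong_induction_on with
  | _ k ih =>
    intro i c hk hi
    rw [countA_loop]
    split
    · next hle =>
      have hii : i ≤ i * i := Nat.le_mul_of_pos_left i hi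
      have hiN : i ≤ N := le_trans hii hle
      rw [ih (N + 1 - (i + 1)) (by omega) (i + 1) _ rfl (by omega)]
      have hsplit : ((N.divisors).filter (fun d => i ≤ d ∧ d * d ≤ N)).card
          = ((N.divisors).filter (fun d => i + 1 ≤ d ∧ d * d ≤ N)).card
            + (if N % i = 0 then 1 else 0) := by
        by_cases hdiv : N % i = 0
        · have hidvd : i ∣ N := Nat.dvd_of_mod_eq_zero hdiv
          have hins : ((N.divisors).filter (fun d => i ≤ d ∧ d * d ≤ N))
              = insert i ((N.divisors).filter (fun d => i + 1 ≤ d ∧ d * d ≤ N)) := by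
            ext d
            simp only [Finset.mem_insert, Finset.mem_filter, Nat.mem_divisors]
            constructor
            · rintro ⟨hd, hid, hdd⟩
              rcases eq_or_lt_of_le hid with h' | h'
              · exact Or.inl h'.symm
              · exact Or.inr ⟨hd, h', hdd⟩
            · rintro (rfl | ⟨hd, hid, hdd⟩)
              · exact ⟨⟨hidvd, by omega⟩, le_refl _, hle⟩
              · exact ⟨hd, by omega, hdd⟩
          rw [hins, Finset.card_insert_of_notMem
            (fun hmem => by simp only [Finset.mem_filter] at hmem; omega), if_pos hdiv]
        · have heqf : ((N.divisors).filter (fun d => i ≤ d ∧ d * d ≤ N))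
              = ((N.divisors).filter (fun d => i + 1 ≤ d ∧ d * d ≤ N)) := by
            ext d
            simp only [Finset.mem_filter, Nat.mem_divisors]
            constructor
            · rintro ⟨hd, hid, hdd⟩
              rcases eq_or_lt_of_le hid with h' | h'
              · exact absurd (Nat.mod_eq_zero_of_dvd (h' ▸ hd.1)) hdiv
              · exact ⟨hd, h', hdd⟩
            · rintro ⟨hd, hid, hdd⟩
              exact ⟨hd, by omega, hdd⟩
          rw [heqf, if_neg hdiv]
          omega
        
      rw [hsplit]
      split_ifs with hdiv <;> omega
    · next hle =>
      have : ((N.divisors).filter (fun d => i ≤ d ∧ d * d ≤ N)) = ∅ := by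
        ext d
        simp only [Finset.mem_filter, Finset.notMem_empty, iff_false, not_and]
        intro _ hid hdd
        exact hle (le_trans (Nat.mul_le_mul hid hid) hdd)
      rw [this]
      simp

-- pairing d ↦ N / d: the number of divisors with d * d ≤ N is (tau + 1) / 2.
theorem pairing (N : Nat) (hN : 0 < N) :
    ((N.divisors).filter (fun d => d * d ≤ N)).card = (N.divisors.card + 1) / 2 := by
  set S := (N.divisors).filter (fun d => d * d ≤ N) with hSdef
  set L := (N.divisors).filter (fun d => N ≤ d * d) with hLdef
  have hSd : ∀ d ∈ S, d ∣ N := fun d hd => (Nat.mem_divisors.mp (Finset.mem_filter.mp hd).1).1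
  have hLd : ∀ d ∈ L, d ∣ N := fun d hd => (Nat.mem_divisors.mp (Finset.mem_filter.mp hd).1).1
  have hmapS : ∀ d ∈ S, N / d ∈ L := by
    intro d hd
    simp only [hSdef, hLdef, Finset.mem_filter, Nat.mem_divisors] at hd ⊢
    obtain ⟨⟨hdvd, hN0⟩, hdd⟩ := hd
    refine ⟨⟨Nat.div_dvd_of_dvd hdvd, hN0⟩, ?_⟩
    obtain ⟨c, rfl⟩ := hdvd
    have hdpos : 0 < d := Nat.pos_of_ne_zero (by rintro rfl; exact hN0 (by simp))
    rw [Nat.mul_div_cancel_left c hdpos]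
    exact Nat.mul_le_mul (Nat.le_of_mul_le_mul_left hdd hdpos) (le_refl c)
  have hmapL : ∀ d ∈ L, N / d ∈ S := by
    intro d hd
    simp only [hSdef, hLdef, Finset.mem_filter, Nat.mem_divisors] at hd ⊢
    obtain ⟨⟨hdvd, hN0⟩, hdd⟩ := hd
    refine ⟨⟨Nat.div_dvd_of_dvd hdvd, hN0⟩, ?_⟩
    obtain ⟨c, rfl⟩ := hdvd
    have hdpos : 0 < d := Nat.pos_of_ne_zero (by rintro rfl; exact hN0 (by simp))
    rw [Nat.mul_div_cancel_left c hdpos]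
    exact Nat.mul_le_mul (Nat.le_of_mul_le_mul_left hdd hdpos) (le_refl c)
  have hcard : S.card = L.card := by
    apply Finset.card_bij' (fun d _ => N / d) (fun d _ => N / d) hmapS hmapL
    · intro a ha; exact Nat.div_div_self (hSd a ha) hN.ne'
    · intro a ha; exact Nat.div_div_self (hLd a ha) hN.ne'
  have hunion : S ∪ L = N.divisors := by
    ext d
    simp only [hSdef, hLdef, Finset.mem_union, Finset.mem_filter]
    constructor
    · rintro (⟨h, _⟩ | ⟨h, _⟩) <;> exact h
    · intro h
      rcases le_total (d * d) N with h' | h'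
      · exact Or.inl ⟨h, h'⟩
      · exact Or.inr ⟨h, h'⟩
  have hinter : S ∩ L = (N.divisors).filter (fun d => d * d = N) := by
    ext d
    simp only [hSdef, hLdef, Finset.mem_inter, Finset.mem_filter]
    constructor
    · rintro ⟨⟨hp1, h1⟩, _, h2⟩
      exact ⟨hp1, le_antisymm h1 h2⟩
    · rintro ⟨hp1, h⟩
      exact ⟨⟨hp1, le_of_eq h⟩, hp1, ge_of_eq h⟩
  have hle1 : ((N.divisors).filter (fun d => d * d = N)).card ≤ 1 := by
    apply Finset.card_le_one.mpr
    intro a ha b hb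
    have ha' := (Finset.mem_filter.mp ha).2
    have hb' := (Finset.mem_filter.mp hb).2
    exact Nat.mul_self_inj.mp (ha'.trans hb'.symm)
  have hsum := Finset.card_union_add_card_inter S L
  rw [hunion, hinter] at hsum
  omega

theorem divOut_spec (p : Nat) (hp : 2 ≤ p) :
    ∀ m e, 0 < m → ∃ k m1, divOut m p e = (m1, e + k) ∧ m = p ^ k * m1 ∧ ¬ p ∣ m1 := by
  intro m
  induction m using Nat.strong_induction_on with
  | _ m ih =>
    intro e hm
    rw [divOut]
    by_cases hd : m % p = 0
    · rw [dif_pos ⟨hp, hm, hd⟩]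
      have hdvd : p ∣ m := Nat.dvd_of_mod_eq_zero hd
      have hmp : 0 < m / p := Nat.div_pos (Nat.le_of_dvd hm hdvd) (by omega)
      obtain ⟨k, m1, heq, hfac, hnd⟩ := ih (m / p) (Nat.div_lt_self hm (by omega)) (e + 1) hmp
      refine ⟨k + 1, m1, ?_, ?_, hnd⟩
      · rw [heq]; congr 1; omega
      · have hm' : m = p * (m / p) := (Nat.mul_div_cancel' hdvd).symm
        rw [hm', hfac]; ring
    · rw [dif_neg (fun hc => hd hc.2.2)]
      exact ⟨0, m, by simp, by simp, fun h => hd (Nat.mod_eq_zero_of_dvd h)⟩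

theorem tauLoop_spec :
    ∀ m p t, 0 < m → 2 ≤ p → (∀ q, q.Prime → q ∣ m → p ≤ q) →
      ((tauLoop m p t).1 = 1 ∨ (tauLoop m p t).1.Prime) ∧
      (tauLoop m p t).2 * ((tauLoop m p t).1.divisors).card = t * m.divisors.card := by
  intro m p t
  induction m, p, t using tauLoop.induct with
  | case1 m p t h hd r ih =>
    intro hm hp hfac
    have hpm : p ∣ m := Nat.dvd_of_mod_eq_zero hd
    have hprime : p.Prime := by
      have h1 : p.minFac ∣ m := dvd_trans (Nat.minFac_dvd p) hpm
      have h2 : p ≤ p.minFac := hfac _ (Nat.minFac_prime (by omega)) h1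
      have h3 : p.minFac ≤ p := Nat.minFac_le (by omega)
      exact Nat.prime_def_minFac.mpr ⟨hp, le_antisymm h3 h2⟩
    obtain ⟨k, m1, heq, hfaceq, hnd⟩ := divOut_spec p hp m 0 hm
    have hm1 : 0 < m1 := by
      rcases Nat.eq_zero_or_pos m1 with rfl | h'
      · rw [hfaceq] at hm; simp at hm
      · exact h'
    have hfac' : ∀ q, q.Prime → q ∣ m1 → p + 1 ≤ q := by
      intro q hq hqd
      have hqm : q ∣ m := hfaceq ▸ Dvd.dvd.mul_left hqd _
      have hle := hfac q hq hqm
      rcases eq_or_lt_of_le hle with rfl | h'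
      · exact absurd hqd hnd
      · omega
    rw [tauLoop, dif_pos h, dif_pos hd]
    have hr : r = (m1, 0 + k) := heq
    simp only [hr, Nat.zero_add] at ih
    simp only [heq, Nat.zero_add]
    obtain ⟨hshape, hval⟩ := ih hm1 (by omega) hfac'
    refine ⟨hshape, ?_⟩
    rw [hval]
    have hcop : (p ^ k).Coprime m1 :=
      Nat.Coprime.pow_left k ((Nat.Prime.coprime_iff_not_dvd hprime).mpr hnd)
    have htau : m.divisors.card = (k + 1) * m1.divisors.card := by
      rw [hfaceq, Nat.Coprime.card_divisors_mul hcop, Nat.divisors_prime_pow hprime,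
        Finset.card_map, Finset.card_range]
    rw [htau]; ring
  | case2 m p t h hd ih =>
    intro hm hp hfac
    have hfac' : ∀ q, q.Prime → q ∣ m → p + 1 ≤ q := by
      intro q hq hqd
      have hle := hfac q hq hqd
      rcases eq_or_lt_of_le hle with rfl | h'
      · exact absurd (Nat.mod_eq_zero_of_dvd hqd) hd
      · omega
    rw [tauLoop, dif_pos h, dif_neg hd]
    exact ih hm (by omega) hfac'
  | case3 m p t h =>
    intro hm hp hfac
    rw [tauLoop, dif_neg h]
    refine ⟨?_, rfl⟩
    rcases Nat.lt_or_ge m 2 with h2 | h2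
    · left; omega
    · right
      by_contra hPm
      have hq := Nat.minFac_prime (show m ≠ 1 by omega)
      have hqd := Nat.minFac_dvd m
      have hpq : p ≤ m.minFac := hfac _ hq hqd
      have hsq : m.minFac * m.minFac ≤ m := by
        have hs := Nat.minFac_sq_le_self hm hPm
        rwa [pow_two] at hs
      have hmul : p * p ≤ m.minFac * m.minFac := Nat.mul_le_mul hpq hpq
      have hpp : ¬ p * p ≤ m := fun hc => h ⟨hc, hp⟩
      omega

-- ===== VERDICT (by name: the statement is the Claim_ definition above) =====
theorem count_factor_pairs_py_spec : Claim_equal_count_factor_pairs_py := by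
  intro n _
  show count_factor_pairs_py n = count_factor_pairs_py_alt n
  unfold count_factor_pairs_py count_factor_pairs_py_alt
  by_cases h0 : n.natAbs = 0
  · simp [h0]
  · have hN : 0 < n.natAbs := Nat.pos_of_ne_zero h0
    simp only [if_neg h0]
    obtain ⟨hshape, hval⟩ := tauLoop_spec n.natAbs 2 1 hN (le_refl 2) (fun q hq _ => hq.two_le)
    set r := tauLoop n.natAbs 2 1 with hr
    have hA : countA_loop n.natAbs 1 0
        = ((n.natAbs.divisors).filter (fun d => d * d ≤ n.natAbs)).card := by
      rw [countA_inv n.natAbs hN 1 0 (by omega), Nat.zero_add]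
      congr 1
      apply Finset.filter_congr
      intro d hd
      exact and_iff_right (Nat.pos_of_mem_divisors hd)
    have htau : (if 1 < r.1 then r.2 * 2 else r.2) = n.natAbs.divisors.card := by
      rcases hshape with h1 | hp
      · rw [h1, Nat.divisors_one] at hval
        rw [if_neg (h1 ▸ (by omega : ¬ (1:ℕ) < 1))]
        simpa using hval
      · rw [if_pos hp.one_lt]
        rw [Nat.Prime.divisors hp, Finset.card_pair hp.one_lt.ne] at hval
        omega
    rw [hA, pairing n.natAbs hN, htau]
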